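-- pv_equiv track=rewrite | github.com/pushkarguptaaa/python | CodingProblems/GettingStarted.py | friendlyPair
-- ===== SOURCE A (Python) =====
-- def friendlyPair(n1, n2):
--     s1, s2 = 0, 0
--     for n in range(1, n1):
--         if n1 % n == 0:
--             s1 += n
--     for n in range(1, n2):
--         if n2 % n == 0:
--             s2 += n
--     r1 = s1 // n1
--     r2 = s2 // n2
--     return r1 == r2
-- ===== SOURCE B (Python) =====
-- def _aliquot(n):
--     # divisor-pair sieve up to sqrt(n): collects every divisor of n (incl. n), then drops n
--     s = 0
--     i = 1
--     while i * i <= n: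
--         if n % i == 0:
--             s += i
--             j = n // i
--             if j != i:
--                 s += j
--         i += 1
--     return s - n
--
--
-- def _ratio(n):
--     if n <= 1:
--         return 0
--     return _aliquot(n) // n
--
--
-- def friendlyPair(n1, n2):
--     return _ratio(n1) == _ratio(n2)
-- ===== Notes on version B (the rewrite author's own statement) =====
-- stated objective: faster
-- what changed: Replaces the two O(n) trial loops over all candidates below n by a divisor-pair scan up to sqrt(n) that adds each divisor d together with n//d, then subtracts n to get the proper-divisor sum.
import Mathlib
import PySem

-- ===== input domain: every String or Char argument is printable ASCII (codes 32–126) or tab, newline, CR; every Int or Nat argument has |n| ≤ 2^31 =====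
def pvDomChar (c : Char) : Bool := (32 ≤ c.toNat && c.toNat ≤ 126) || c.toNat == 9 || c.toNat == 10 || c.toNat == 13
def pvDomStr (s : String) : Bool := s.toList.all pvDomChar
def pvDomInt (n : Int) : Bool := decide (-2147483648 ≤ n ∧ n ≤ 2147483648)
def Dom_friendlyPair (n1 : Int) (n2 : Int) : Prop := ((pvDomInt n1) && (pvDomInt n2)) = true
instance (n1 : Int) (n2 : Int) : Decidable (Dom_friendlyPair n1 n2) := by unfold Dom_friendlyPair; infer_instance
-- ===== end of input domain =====

-- B replaces the two O(n) trial loops by a divisor-pair scan up to sqrt(n) (adding d and n//d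
-- together), an asymptotically faster exact re-implementation.

-- ===== PORT A =====
def friendlyPair (n1 : Int) (n2 : Int) : Bool :=
  let s1 := (PySem.List.pyRange 1 n1 1).foldl
    (fun s n => if PySem.Int.mod n1 n == 0 then s + n else s) 0
  let s2 := (PySem.List.pyRange 1 n2 1).foldl
    (fun s n => if PySem.Int.mod n2 n == 0 then s + n else s) 0
  let r1 := PySem.Int.floordiv s1 n1
  let r2 := PySem.Int.floordiv s2 n2
  r1 == r2

-- ===== PORT B =====
-- the while-loop of _aliquot: i runs while i*i ≤ m, pairing each divisor i with m / i.
-- fuel = m + 1 - i + slack bounds the iteration count (i*i ≤ m forces i ≤ m), making the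
-- recursion structural; with fuel = m + 1 and i = 1 it is exactly the Python while-loop.
def pvAliquotLoop (m : Nat) (fuel : Nat) (i : Nat) (s : Nat) : Nat :=
  match fuel with
  | 0 => s
  | fuel' + 1 =>
    if i * i ≤ m then
      pvAliquotLoop m fuel' (i + 1)
        (if m % i == 0 then s + i + (if m / i != i then m / i else 0) else s)
    else s

def pvAliquot (n : Int) : Int := (pvAliquotLoop n.toNat (n.toNat + 1) 1 0 : Int) - n

def pvRatio (n : Int) : Int :=
  if n ≤ 1 then 0 else PySem.Int.floordiv (pvAliquot n) n

def friendlyPair_alt (n1 : Int) (n2 : Int) : Bool := pvRatio n1 == pvRatio n2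

-- ===== PRECONDITION & SPEC =====
-- Pre_ excludes exactly n1 = 0 or n2 = 0, where A raises ZeroDivisionError.
def Pre_friendlyPair (n1 : Int) (n2 : Int) : Prop := n1 ≠ 0 ∧ n2 ≠ 0
instance (n1 : Int) (n2 : Int) : Decidable (Pre_friendlyPair n1 n2) := by
  unfold Pre_friendlyPair; infer_instance
def pvWitness_friendlyPair : Int × Int := (6, 28)

def Spec_friendlyPair (n1 : Int) (n2 : Int) (out : Bool) : Prop := out = friendlyPair_alt n1 n2
instance (n1 : Int) (n2 : Int) (out : Bool) : Decidable (Spec_friendlyPair n1 n2 out) := by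
  unfold Spec_friendlyPair; infer_instance

-- ===== CLAIM (what is proved, stated in full; the proofs are below) =====
def Claim_equal_friendlyPair : Prop := ∀ (n1 : Int) (n2 : Int), Dom_friendlyPair n1 n2 → Pre_friendlyPair n1 n2 → Spec_friendlyPair n1 n2 (friendlyPair n1 n2)

-- ===== LEMMAS AND PROOFS =====

-- A's loop sum, as a Finset sum over the divisors below the bound
lemma foldA_eq (m b : Nat) :
    (PySem.List.pyRange 1 (b : Int) 1).foldl
      (fun s k => if PySem.Int.mod (m : Int) k == 0 then s + k else s) 0
    = ((∑ d ∈ (Finset.Ico 1 b).filter (fun d => d ∣ m), d : Nat) : Int) := by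
  induction b with
  | zero => simp [PySem.List.pyRange_one_eq_nil]
  | succ b ih =>
    rcases Nat.eq_zero_or_pos b with hb | hb
    · subst hb
      simp [PySem.List.pyRange_one_eq_nil]
    · have h1 : (1 : Int) ≤ (b : Int) := by exact_mod_cast hb
      rw [show ((↑(b + 1) : Int)) = (b : Int) + 1 by push_cast; ring,
        PySem.List.pyRange_one_succ_right h1, List.foldl_append]
      rw [ih]
      have hIco : Finset.Ico 1 (b + 1) = insert b (Finset.Ico 1 b) := by
        rw [Nat.Ico_succ_right_eq_insert_Ico hb]
      rw [hIco, Finset.filter_insert]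
      by_cases hd : b ∣ m
      · have hmod : PySem.Int.mod (m : Int) (b : Int) = 0 := by
          rw [PySem.Int.mod_eq_zero_iff_dvd]; exact_mod_cast hd
        have hnot : b ∉ (Finset.Ico 1 b).filter (fun d => d ∣ m) := by
          simp [Finset.mem_filter]
        simp [hd, hmod, Finset.sum_insert hnot]
        ring
      · have hmod : (PySem.Int.mod (m : Int) (b : Int) == 0) = false := by
          simp only [beq_eq_false_iff_ne, ne_eq, PySem.Int.mod_eq_zero_iff_dvd,
            Int.natCast_dvd_natCast]
          exact hd
        simp only [List.foldl_cons, List.foldl_nil, hmod, Bool.false_eq_true, if_false]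
        simp [hd]

-- invariant of B's while-loop: it still owes every divisor d with i ≤ d and i ≤ m / d
lemma pvAliquotLoop_inv (m : Nat) : ∀ (fuel i s : Nat), 1 ≤ i → m + 1 ≤ i + fuel →
    pvAliquotLoop m fuel i s
    = s + ∑ d ∈ (Finset.Ico 1 (m + 1)).filter (fun d => d ∣ m ∧ i ≤ d ∧ i ≤ m / d), d := by
  intro fuel
  induction fuel with
  | zero =>
    intro i s hi hf
    have hempty : (Finset.Ico 1 (m + 1)).filter (fun d => d ∣ m ∧ i ≤ d ∧ i ≤ m / d) = ∅ := by
      ext d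
      simp only [Finset.mem_filter, Finset.mem_Ico, Finset.notMem_empty, iff_false]
      rintro ⟨⟨hd1, hd2⟩, hddvd, hdi, hdmi⟩
      omega
    rw [hempty]
    simp [pvAliquotLoop]
  | succ fuel' ihf =>
    intro i s hi hf
    show (if i * i ≤ m then
        pvAliquotLoop m fuel' (i + 1)
          (if m % i == 0 then s + i + (if m / i != i then m / i else 0) else s)
      else s) = _
    by_cases h : i * i ≤ m
    · rw [if_pos h]
      have hm0 : m ≠ 0 := by
        intro h0; subst h0
        have h11 : 1 * 1 ≤ i * i := Nat.mul_le_mul hi hi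
        omega
      have hile : i ≤ m / i := (Nat.le_div_iff_mul_le hi).2 h
      have him' : i ≤ m := le_trans (Nat.le_mul_of_pos_left i hi) h
      have hIH := ihf (i + 1) (if m % i == 0 then s + i + (if m / i != i then m / i else 0) else s)
        (by omega) (by omega)
      rw [hIH]
      by_cases hd : m % i = 0
      · have hdvd : i ∣ m := Nat.dvd_of_mod_eq_zero hd
        have hdi : m / i ∣ m := Nat.div_dvd_of_dvd hdvd
        have hdds : m / (m / i) = i := Nat.div_div_self hdvd hm0
        have him : i ≤ m := Nat.le_of_dvd (Nat.pos_of_ne_zero hm0) hdvd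
        have hdim : m / i ≤ m := Nat.div_le_self m i
        have hdipos : 1 ≤ m / i := le_trans hi hile
        -- the set at i is the set at i+1 plus {i, m/i}
        have hset : (Finset.Ico 1 (m + 1)).filter (fun d => d ∣ m ∧ i ≤ d ∧ i ≤ m / d)
            = if m / i = i then
                insert i ((Finset.Ico 1 (m + 1)).filter (fun d => d ∣ m ∧ i + 1 ≤ d ∧ i + 1 ≤ m / d))
              else
                insert i (insert (m / i)
                  ((Finset.Ico 1 (m + 1)).filter (fun d => d ∣ m ∧ i + 1 ≤ d ∧ i + 1 ≤ m / d))) := by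
          ext d
          constructor
          · intro hdmem
            simp only [Finset.mem_filter, Finset.mem_Ico] at hdmem
            obtain ⟨⟨hd1, hd2⟩, hddvd, hdi', hdmi⟩ := hdmem
            have hrec : d = i ∨ d = m / i ∨ (i + 1 ≤ d ∧ i + 1 ≤ m / d) := by
              by_cases he1 : d = i
              · exact Or.inl he1
              by_cases he2 : d = m / i
              · exact Or.inr (Or.inl he2)
              refine Or.inr (Or.inr ⟨by omega, ?_⟩)
              have : m / d ≠ i := by
                intro hmd
                have : m / (m / d) = d := Nat.div_div_self hddvd hm0
                rw [hmd] at this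
                exact he2 this.symm
              omega
            split_ifs with hcase
            · rcases hrec with h1 | h1 | h1
              · simp [h1]
              · rw [hcase] at h1; simp [h1]
              · simp only [Finset.mem_insert, Finset.mem_filter, Finset.mem_Ico]
                exact Or.inr ⟨⟨hd1, hd2⟩, hddvd, h1⟩
            · rcases hrec with h1 | h1 | h1
              · simp [h1]
              · simp [h1]
              · simp only [Finset.mem_insert, Finset.mem_filter, Finset.mem_Ico]
                exact Or.inr (Or.inr ⟨⟨hd1, hd2⟩, hddvd, h1⟩)
          · intro hdmem
            have base : ∀ e, e ∈ (Finset.Ico 1 (m + 1)).filter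
                (fun d => d ∣ m ∧ i + 1 ≤ d ∧ i + 1 ≤ m / d) →
                e ∈ (Finset.Ico 1 (m + 1)).filter (fun d => d ∣ m ∧ i ≤ d ∧ i ≤ m / d) := by
              intro e he
              simp only [Finset.mem_filter, Finset.mem_Ico] at he ⊢
              obtain ⟨h1, h2, h3, h4⟩ := he
              exact ⟨h1, h2, by omega, by omega⟩
            have himem : i ∈ (Finset.Ico 1 (m + 1)).filter (fun d => d ∣ m ∧ i ≤ d ∧ i ≤ m / d) := by
              simp only [Finset.mem_filter, Finset.mem_Ico]
              exact ⟨⟨hi, by omega⟩, hdvd, le_refl i, hile⟩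
            have hmimem : m / i ∈ (Finset.Ico 1 (m + 1)).filter
                (fun d => d ∣ m ∧ i ≤ d ∧ i ≤ m / d) := by
              simp only [Finset.mem_filter, Finset.mem_Ico]
              exact ⟨⟨hdipos, by omega⟩, hdi, hile, by rw [hdds]⟩
            split_ifs at hdmem with hcase
            · rcases Finset.mem_insert.1 hdmem with h1 | h1
              · subst h1; exact himem
              · exact base d h1
            · rcases Finset.mem_insert.1 hdmem with h1 | h1
              · subst h1; exact himem
              rcases Finset.mem_insert.1 h1 with h2 | h2
              · subst h2; exact hmimem
              · exact base d h2
        rw [hset]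
        have hnotmem : ∀ x, ¬ (x ∈ (Finset.Ico 1 (m + 1)).filter
            (fun d => d ∣ m ∧ i + 1 ≤ d ∧ i + 1 ≤ m / d) ∧ (x = i ∨ m / x = i)) := by
          intro x ⟨hx, hcase⟩
          simp only [Finset.mem_filter, Finset.mem_Ico] at hx
          obtain ⟨_, hxdvd, hx1, hx2⟩ := hx
          rcases hcase with h1 | h1
          · omega
          · have : m / (m / x) = x := Nat.div_div_self hxdvd hm0
            rw [h1] at this
            omega
        by_cases hcase : m / i = i
        · have hni : i ∉ (Finset.Ico 1 (m + 1)).filter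
              (fun d => d ∣ m ∧ i + 1 ≤ d ∧ i + 1 ≤ m / d) := by
            intro hmem; exact hnotmem i ⟨hmem, Or.inl rfl⟩
          simp only [hcase, hd, beq_self_eq_true, if_true,
            bne_self_eq_false, Bool.false_eq_true, if_false, Finset.sum_insert hni]
          omega
        · have hni' : i ∉ insert (m / i) ((Finset.Ico 1 (m + 1)).filter
              (fun d => d ∣ m ∧ i + 1 ≤ d ∧ i + 1 ≤ m / d)) := by
            intro hmem
            rcases Finset.mem_insert.1 hmem with h1 | h1
            · exact hcase h1.symm
            · exact hnotmem i ⟨h1, Or.inl rfl⟩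
          have hnmi : m / i ∉ (Finset.Ico 1 (m + 1)).filter
              (fun d => d ∣ m ∧ i + 1 ≤ d ∧ i + 1 ≤ m / d) := by
            intro hmem; exact hnotmem (m / i) ⟨hmem, Or.inr hdds⟩
          have hbne : (m / i != i) = true := by simp [hcase]
          simp only [if_neg hcase, hd, beq_self_eq_true, if_true, hbne, if_true,
            Finset.sum_insert hni', Finset.sum_insert hnmi]
          omega
      · -- i does not divide m: the owed set is unchanged
        have hset : (Finset.Ico 1 (m + 1)).filter (fun d => d ∣ m ∧ i ≤ d ∧ i ≤ m / d)
            = (Finset.Ico 1 (m + 1)).filter (fun d => d ∣ m ∧ i + 1 ≤ d ∧ i + 1 ≤ m / d) := by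
          ext d
          simp only [Finset.mem_filter, Finset.mem_Ico]
          constructor
          · rintro ⟨h1, h2, h3, h4⟩
            have hne1 : d ≠ i := by
              intro he; subst he; exact hd (Nat.dvd_iff_mod_eq_zero.mp h2)
            have hne2 : m / d ≠ i := by
              intro he
              have hdvd' : i ∣ m := he ▸ Nat.div_dvd_of_dvd h2
              exact hd (Nat.dvd_iff_mod_eq_zero.mp hdvd')
            exact ⟨h1, h2, by omega, by omega⟩
          · rintro ⟨h1, h2, h3, h4⟩
            exact ⟨h1, h2, by omega, by omega⟩
        have hbeq : (m % i == 0) = false := by simp [hd]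
        rw [hbeq]
        simp only [Bool.false_eq_true, if_false]
        rw [hset]
    · rw [if_neg h]
      -- loop done: every remaining candidate set is empty
      have hempty : (Finset.Ico 1 (m + 1)).filter (fun d => d ∣ m ∧ i ≤ d ∧ i ≤ m / d) = ∅ := by
        ext d
        simp only [Finset.mem_filter, Finset.mem_Ico, Finset.notMem_empty, iff_false]
        rintro ⟨⟨hd1, hd2⟩, hddvd, hdi, hdmi⟩
        have hdm : d * (m / d) = m := Nat.mul_div_cancel' hddvd
        have : i * i ≤ d * (m / d) := Nat.mul_le_mul hdi hdmi
        omega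
      rw [hempty]
      simp [Finset.sum_empty]

-- the full σ-sum B's loop computes, versus A's proper-divisor sum
lemma pvAliquotLoop_total (m : Nat) (hm : 1 ≤ m) :
    pvAliquotLoop m (m + 1) 1 0 = (∑ d ∈ (Finset.Ico 1 m).filter (fun d => d ∣ m), d) + m := by
  rw [pvAliquotLoop_inv m (m + 1) 1 0 le_rfl (by omega)]
  have hfull : (Finset.Ico 1 (m + 1)).filter (fun d => d ∣ m ∧ 1 ≤ d ∧ 1 ≤ m / d)
      = (Finset.Ico 1 (m + 1)).filter (fun d => d ∣ m) := by
    apply Finset.filter_congr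
    intro d hd
    simp only [Finset.mem_Ico] at hd
    constructor
    · exact fun h => h.1
    · intro h
      exact ⟨h, by omega, (Nat.le_div_iff_mul_le (by omega)).2 (by
        have := Nat.le_of_dvd (by omega) h; omega)⟩
  rw [hfull]
  have hIco : Finset.Ico 1 (m + 1) = insert m (Finset.Ico 1 m) := by
    rw [Nat.Ico_succ_right_eq_insert_Ico hm]
  rw [hIco, Finset.filter_insert, if_pos (dvd_refl m),
    Finset.sum_insert (by simp [Finset.mem_filter])]
  omega

-- the per-argument ratio of A equals pvRatio
lemma ratio_eq (n : Int) :
    PySem.Int.floordiv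
      ((PySem.List.pyRange 1 n 1).foldl
        (fun s k => if PySem.Int.mod n k == 0 then s + k else s) 0) n
    = pvRatio n := by
  by_cases h1 : n ≤ 1
  · rw [PySem.List.pyRange_one_eq_nil h1]
    simp only [List.foldl_nil, pvRatio, if_pos h1]
    show Int.fdiv 0 n = 0
    exact Int.zero_fdiv n
  · have h2 : (2 : Int) ≤ n := by omega
    set m := n.toNat with hmdef
    have hm : 1 ≤ m := by omega
    have hn' : n = (m : Int) := by omega
    rw [hn', foldA_eq m m]
    have hratio : pvRatio n = PySem.Int.floordiv (pvAliquot n) n := by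
      rw [pvRatio, if_neg (by omega)]
    rw [hn'] at hratio
    rw [hratio, pvAliquot]
    congr 1
    have htn : ((m : Int)).toNat = m := by simp
    rw [htn, pvAliquotLoop_total m hm]
    push_cast
    omega

-- ===== VERDICT (by name: the statement is the Claim_ definition above) =====
theorem friendlyPair_spec : Claim_equal_friendlyPair := by
  intro n1 n2 _ hpre
  show friendlyPair n1 n2 = friendlyPair_alt n1 n2
  simp only [friendlyPair, friendlyPair_alt, ratio_eq n1, ratio_eq n2]
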